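-- pv_equiv track=rewrite | github.com/tknkaa/neetcode-submissions-2et2flcr | Data Structures & Algorithms/anagram-groups/submission-0.py | counter_to_unique
-- ===== SOURCE A (Python) =====
-- from collections import Counter, defaultdict
--
-- def counter_to_unique(counter: Counter) -> str:
--     ans = ""
--     keys = list(counter.keys())
--     keys.sort()
--     for key in keys:
--         count = counter[key]
--         ans += count * key
--     return ans
-- ===== SOURCE B (Python) =====
-- def counter_to_unique(counter) -> str:
--     expanded = [key for key, count in counter.items() for _ in range(count)]
--     return "".join(sorted(expanded))
-- ===== Notes on version B (the rewrite author's own statement) =====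
-- stated objective: simpler
-- what changed: B expands the counter into its full multiset of keys (each key repeated count times) and sorts that whole multiset before joining, instead of sorting the distinct keys and concatenating count*key per key.
import Mathlib
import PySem

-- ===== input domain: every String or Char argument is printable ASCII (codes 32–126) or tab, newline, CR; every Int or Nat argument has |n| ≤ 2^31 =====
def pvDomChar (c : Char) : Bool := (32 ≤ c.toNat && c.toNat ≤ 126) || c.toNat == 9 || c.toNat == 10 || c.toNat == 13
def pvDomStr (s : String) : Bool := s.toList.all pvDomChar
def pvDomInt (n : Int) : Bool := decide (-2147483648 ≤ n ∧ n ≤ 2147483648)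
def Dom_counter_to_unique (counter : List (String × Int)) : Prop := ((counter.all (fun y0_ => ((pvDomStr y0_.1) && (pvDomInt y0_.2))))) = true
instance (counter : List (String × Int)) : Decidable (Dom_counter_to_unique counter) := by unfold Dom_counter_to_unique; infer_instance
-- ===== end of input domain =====

-- B sorts the fully expanded multiset of keys (each key repeated count times) and joins it,
-- instead of A's sort-the-distinct-keys-then-concatenate-count*key loop; objective: simpler.

-- ===== PORT A =====
-- A: ans = ""; keys = sorted(counter.keys()); for key in keys: ans += counter[key] * key
-- (the string accumulator is carried as a List Char and packed by String.ofList at the end;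
--  strings are sorted by the key `·.toList`: code-point lexicographic = Python's str order)
def counter_to_unique (counter : List (String × Int)) : String :=
  let d := PySem.Dict.ofList counter
  let keys := PySem.List.sorted d.keys (fun k => k.toList) false
  String.ofList (keys.foldl (fun ans key => ans ++ PySem.List.pyRepeat key.toList (d.getD key 0)) [])

-- ===== PORT B =====
-- B: expanded = [key for key, count in counter.items() for _ in range(count)]; return "".join(sorted(expanded))
def counter_to_unique_alt (counter : List (String × Int)) : String :=
  let expanded := (PySem.Dict.ofList counter).items.flatMap (fun p => List.replicate p.2.toNat p.1)
  PySem.Str.join "" (PySem.List.sorted expanded (fun s => s.toList) false)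

-- ===== PRECONDITION & SPEC =====
def Spec_counter_to_unique (counter : List (String × Int)) (out : String) : Prop := out = counter_to_unique_alt counter
instance (counter : List (String × Int)) (out : String) : Decidable (Spec_counter_to_unique counter out) := by unfold Spec_counter_to_unique; infer_instance

-- ===== CLAIM (what is proved, stated in full; the proofs are below) =====
def Claim_equal_counter_to_unique : Prop := ∀ (counter : List (String × Int)), Dom_counter_to_unique counter → Spec_counter_to_unique counter (counter_to_unique counter)

-- ===== LEMMAS AND PROOFS =====

-- the two DecidableLT instances on List Char in scope are propositionally equal
lemma hinst_eq : (fun (a b : List Char) => a.decidableLT b) = (@LinearOrder.toDecidableLT (List Char) List.instLinearOrder) := by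
  funext a b; exact Subsingleton.elim _ _

-- rewrite `sorted` over String with toList key into the LinearOrder-instance form the PySem order lemmas use
lemma sorted_inst (xs : List String) (key : String → List Char) (r : Bool) :
    PySem.List.sorted xs key r
      = @PySem.List.sorted String (List Char) List.instLinearOrder.toLT (@LinearOrder.toDecidableLT _ List.instLinearOrder) xs key r := by
  show @PySem.List.sorted String (List Char) List.instLT (fun a b => a.decidableLT b) xs key r = _
  rw [hinst_eq]

lemma sorted_pairwise' (xs : List String) (key : String → List Char) :
    (PySem.List.sorted xs key false).Pairwise (fun a b => key a ≤ key b) := by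
  rw [sorted_inst]
  exact PySem.List.sorted_pairwise (κ := List Char) xs key

-- a ≤-sorted list of strings stays ≤-sorted after repeating each element in place
lemma pairwise_flatMap_replicate (l : List String) (n : String → Nat)
    (h : l.Pairwise (fun a b => a.toList ≤ b.toList)) :
    (l.flatMap (fun k => List.replicate (n k) k)).Pairwise (fun a b => a.toList ≤ b.toList) := by
  induction l with
  | nil => simp
  | cons k t ih =>
    rcases List.pairwise_cons.mp h with ⟨hk, ht⟩
    rw [List.flatMap_cons, List.pairwise_append]
    refine ⟨List.pairwise_replicate.mpr (Or.inr le_rfl), ih ht, ?_⟩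
    intro x hx y hy
    rcases List.eq_of_mem_replicate hx with rfl
    rcases List.mem_flatMap.mp hy with ⟨w, hw, hyw⟩
    rcases List.eq_of_mem_replicate hyw with rfl
    exact hk _ hw

lemma string_toList_injective : Function.Injective String.toList := by
  intro a b h
  have := congrArg String.ofList h
  simpa using this

-- KEY LEMMA: sorting the expanded multiset = expanding the sorted key list block by block
lemma sorted_flatMap_replicate (l : List String) (n : String → Nat) :
    PySem.List.sorted (l.flatMap (fun k => List.replicate (n k) k)) (fun s => s.toList) false
      = (PySem.List.sorted l (fun s => s.toList) false).flatMap (fun k => List.replicate (n k) k) := by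
  have hpermL : (PySem.List.sorted (l.flatMap (fun k => List.replicate (n k) k)) (fun s => s.toList) false).Perm
      (l.flatMap (fun k => List.replicate (n k) k)) := PySem.List.sorted_perm _ _ false
  have hpermS : (PySem.List.sorted l (fun s => s.toList) false).Perm l := PySem.List.sorted_perm _ _ false
  have hperm : (PySem.List.sorted (l.flatMap (fun k => List.replicate (n k) k)) (fun s => s.toList) false).Perm
      ((PySem.List.sorted l (fun s => s.toList) false).flatMap (fun k => List.replicate (n k) k)) :=
    hpermL.trans (List.Perm.flatMap hpermS.symm (fun _ _ => List.Perm.refl _))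
  have hp1 := sorted_pairwise' (l.flatMap (fun k => List.replicate (n k) k)) (fun s => s.toList)
  have hp2 := pairwise_flatMap_replicate _ n (sorted_pairwise' l (fun s => s.toList))
  exact PySem.List.eq_of_perm_of_pairwise_le_of_injective (fun s => s.toList)
    string_toList_injective hperm hp1 hp2

-- "".join is flatten (on the char-list side)
lemma join_empty_eq_flatten (ls : List (List Char)) :
    PySem.Chars.join [] ls = ls.flatten := by
  induction ls with
  | nil => exact PySem.Chars.join_nil []
  | cons p rest ih =>
    cases rest with
    | nil => simp [PySem.Chars.join, List.intercalate]
    | cons q rest' =>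
      rw [PySem.Chars.join_cons_cons, ih]
      simp

-- ===== VERDICT (by name: the statement is the Claim_ definition above) =====
theorem counter_to_unique_spec : Claim_equal_counter_to_unique := by
  intro counter _
  show counter_to_unique counter = counter_to_unique_alt counter
  unfold counter_to_unique counter_to_unique_alt
  have hnd : (PySem.Dict.ofList counter).keys.Nodup := PySem.Dict.nodup_keys_ofList counter
  show String.ofList ((PySem.List.sorted (PySem.Dict.ofList counter).keys (fun k => k.toList) false).foldl
        (fun ans key => ans ++ PySem.List.pyRepeat key.toList ((PySem.Dict.ofList counter).getD key 0)) [])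
      = PySem.Str.join "" (PySem.List.sorted
          ((PySem.Dict.ofList counter).items.flatMap (fun p => List.replicate p.2.toNat p.1))
          (fun s => s.toList) false)
  generalize (PySem.Dict.ofList counter) = d at hnd ⊢
  -- B's expanded multiset is the flatMap of replicate over the distinct keys
  rw [PySem.Dict.items_eq_map_keys d hnd 0]
  simp only [List.flatMap_map]
  -- B's sort of the multiset = A's sorted key list, expanded block by block
  rw [sorted_flatMap_replicate d.keys (fun k => (d.getD k 0).toNat)]
  -- A's loop is "".join of the same block list, character by character
  rw [PySem.List.foldl_append_eq_flatMap, List.nil_append, PySem.Str.join]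
  congr 1
  show _ = PySem.Chars.join "".toList _
  rw [show ("" : String).toList = [] from rfl, join_empty_eq_flatten]
  rw [← List.flatMap_def, List.flatMap_assoc]
  exact List.flatMap_congr (fun k _ => by
    simp [PySem.List.pyRepeat, List.flatMap_def, List.map_replicate])
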